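-- pv_equiv track=rewrite | github.com/Alireza2317/Project_Euler | 51/51.py | select_digits_indices
-- ===== SOURCE A (Python) =====
-- def select_digits_indices(number_len: int, n: int) -> list[set[int]]:
-- 	"""
-- 	Returns a list of sets
-- 	each set contains indices
-- 	"""
-- 	if n >= number_len: return None
--
-- 	results = []
--
-- 	for binary_n in range(1, 2**number_len - 1):
-- 		bn = bin(binary_n).removeprefix('0b').zfill(number_len)
-- 		if bn.count('1') != n: continue
--
-- 		indices: set[int] = set()
--
-- 		for i, b in enumerate(bn):
-- 			if b == '1': indices.add(i)
--
-- 		results.append(indices)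
--
-- 	return results
-- ===== SOURCE B (Python) =====
-- def select_digits_indices(number_len: int, n: int) -> list[set[int]]:
-- 	"""
-- 	Returns a list of sets
-- 	each set contains indices
-- 	"""
-- 	if n >= number_len: return None
-- 	if n <= 0: return []
-- 	# rows[k]: index-lists over the first l positions with exactly k members,
-- 	# ordered by increasing value of the corresponding binary number
-- 	rows = [[[]]] + [[] for _ in range(n)]
-- 	for _ in range(number_len):
-- 		rows = [
-- 			[[i + 1 for i in s] for s in rows[k]]
-- 			+ ([[0] + [i + 1 for i in s] for s in rows[k - 1]] if k > 0 else [])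
-- 			for k in range(n + 1)
-- 		]
-- 	return [set(s) for s in rows[n]]
-- ===== Notes on version B (the rewrite author's own statement) =====
-- stated objective: alternative
-- what changed: Instead of scanning all 2**number_len binary strings and keeping those with n ones, B builds the index sets directly by a bottom-up DP on the length (sets without position 0, shifted, followed by sets containing position 0), which yields exactly the C(number_len,n) sets already in increasing order of the corresponding binary value; intended as faster (O(C(L,n)*L) work vs A's O(2^L*L) scan) but a timing run could not confirm this on its random input family, where both time out on large inputs.
import Mathlib
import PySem

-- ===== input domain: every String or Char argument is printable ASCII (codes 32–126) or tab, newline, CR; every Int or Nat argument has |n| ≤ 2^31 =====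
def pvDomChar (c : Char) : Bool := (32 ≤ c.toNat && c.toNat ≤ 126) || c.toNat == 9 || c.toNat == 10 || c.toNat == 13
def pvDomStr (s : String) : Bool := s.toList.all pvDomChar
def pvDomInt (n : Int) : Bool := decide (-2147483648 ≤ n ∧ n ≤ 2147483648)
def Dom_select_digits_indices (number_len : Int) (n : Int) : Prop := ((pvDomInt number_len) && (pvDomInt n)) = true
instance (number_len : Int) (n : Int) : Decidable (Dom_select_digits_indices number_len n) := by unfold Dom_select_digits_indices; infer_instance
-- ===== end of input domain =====

-- B replaces A's scan of all 2**number_len binary strings by a bottom-up DP on the length that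
-- builds only the C(number_len, n) index sets, already in increasing binary-value order.

-- ===== PORT A =====
-- '2**number_len' is ported as (2 : Int) ^ number_len.toNat — exact for number_len ≥ 0, which
-- Pre_ guarantees whenever this expression is reached (otherwise Python A raises TypeError).
-- "bin(binary_n).removeprefix('0b')" is PySem.Int.toBinChars (exact for binary_n ≥ 0, and the
-- loop only produces binary_n ≥ 1).
def select_digits_indices (number_len : Int) (n : Int) : Option (List (List Int)) :=
  if n ≥ number_len then none
  else
    some ((PySem.List.pyRange 1 ((2 : Int) ^ number_len.toNat - 1)).foldl
      (fun results binary_n =>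
        let bn := PySem.Chars.zfill (PySem.Int.toBinChars binary_n) number_len
        if ((PySem.Chars.count bn ['1'] : Int) ≠ n) then results
        else
          results ++ [(PySem.List.enumerate bn).foldl
            (fun (indices : PySem.Set Int) ib =>
              if ib.2 = '1' then PySem.Set.add indices ib.1 else indices)
            PySem.Set.empty])
      [])

-- ===== PORT B =====
-- one round of Source B's DP loop; the indices k and k-1 lie inside rows (length n+1), so the
-- plain List.getD is exact for Python's rows[k] / rows[k-1]
def pvAltStep (n : Nat) (rows : List (List (List Int))) : List (List (List Int)) :=
  (List.range (n + 1)).map (fun k =>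
    (rows.getD k []).map (fun s => s.map (· + 1)) ++
    (if k > 0 then (rows.getD (k - 1) []).map (fun s => 0 :: s.map (· + 1)) else []))

def select_digits_indices_alt (number_len : Int) (n : Int) : Option (List (List Int)) :=
  if n ≥ number_len then none
  else if n ≤ 0 then some []
  else
    let rows0 : List (List (List Int)) := [[[]]] ++ List.replicate n.toNat []
    let rows := (PySem.List.pyRange 0 number_len).foldl (fun rows _ => pvAltStep n.toNat rows) rows0
    some ((rows.getD n.toNat []).map PySem.Set.ofList)

-- ===== PRECONDITION & SPEC =====
-- Pre_ excludes only the inputs where A raises TypeError: number_len < 0 together with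
-- n < number_len makes 2**number_len a float, which range() rejects (B returns [] there).
def Pre_select_digits_indices (number_len : Int) (n : Int) : Prop :=
  0 ≤ number_len ∨ number_len ≤ n
instance (number_len : Int) (n : Int) : Decidable (Pre_select_digits_indices number_len n) := by
  unfold Pre_select_digits_indices; infer_instance
def pvWitness_select_digits_indices : Int × Int := (3, 1)

def Spec_select_digits_indices (number_len : Int) (n : Int) (out : Option (List (List Int))) : Prop :=
  out = select_digits_indices_alt number_len n
instance (number_len : Int) (n : Int) (out : Option (List (List Int))) : Decidable (Spec_select_digits_indices number_len n out) := by unfold Spec_select_digits_indices; infer_instance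

-- ===== CLAIM (what is proved, stated in full; the proofs are below) =====
def Claim_equal_select_digits_indices : Prop := ∀ (number_len : Int) (n : Int), Dom_select_digits_indices number_len n → Pre_select_digits_indices number_len n → Spec_select_digits_indices number_len n (select_digits_indices number_len n)

-- ===== LEMMAS AND PROOFS =====

-- the length-L binary representation of m (most significant first), and the positions of its ones
def pvBits : Nat → Nat → List Bool
  | 0, _ => []
  | L + 1, m => pvBits L (m / 2) ++ [decide (m % 2 = 1)]

def pvCharOf (b : Bool) : Char := if b then '1' else '0'

-- positions (from s upward) of the true entries
def pvIdxs : List Bool → Int → List Int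
  | [], _ => []
  | b :: bs, s => (if b then [s] else []) ++ pvIdxs bs (s + 1)

-- what A's loop collects, re-indexed over all m < 2^L
def pvA (L : Nat) (k : Int) : List (List Int) :=
  (List.range (2 ^ L)).filterMap (fun m =>
    if ((pvBits L m).count true : Int) = k
    then some (pvIdxs (pvBits L m) 0)
    else none)

-- ---- Python str.count with a single-character needle is List.count ----
theorem pv_count_go (c : Char) : ∀ (l : List Char) (fuel acc : Nat), l.length ≤ fuel →
    PySem.Chars.count.go [c] fuel l acc = acc + l.count c := by
  intro l
  induction l with
  | nil => intro fuel acc _; cases fuel <;> simp [PySem.Chars.count.go]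
  | cons h t ih =>
    intro fuel acc hf
    cases fuel with
    | zero => simp at hf
    | succ f =>
      have hpre : List.isPrefixOf [c] (h :: t) = (c == h) := by simp [List.isPrefixOf]
      simp only [PySem.Chars.count.go, hpre]
      by_cases hc : c = h
      · subst hc
        simp only [beq_self_eq_true, if_true, List.length_singleton]
        rw [List.drop_one, List.tail_cons, ih f (acc + 1) (by simpa using hf)]
        simp [List.count_cons]
        omega
      · have hb : (c == h) = false := by simpa using hc
        have hb' : (h == c) = false := by simpa using fun h' => hc h'.symm
        simp only [hb, Bool.false_eq_true, if_false]
        rw [ih f acc (by simpa using hf)]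
        simp [List.count_cons, hb']

theorem pv_count_single (l : List Char) (c : Char) : PySem.Chars.count l [c] = l.count c := by
  unfold PySem.Chars.count
  simp [pv_count_go c l l.length 0 (le_refl _)]

-- ---- Nat.toDigits 2: unfolding recurrence ----
theorem pv_toDigitsCore_append : ∀ (f n : Nat) (r : List Char),
    Nat.toDigitsCore 2 f n r = Nat.toDigitsCore 2 f n [] ++ r := by
  intro f
  induction f with
  | zero => intro n r; simp [Nat.toDigitsCore]
  | succ f ih =>
    intro n r
    simp only [Nat.toDigitsCore]
    by_cases h : n / 2 = 0
    · simp [h]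
    · simp only [h, if_false]
      rw [ih (n / 2) (Nat.digitChar (n % 2) :: r), ih (n / 2) [Nat.digitChar (n % 2)]]
      simp

theorem pv_toDigitsCore_fuel : ∀ (n f : Nat), n < f → Nat.toDigitsCore 2 f n [] = Nat.toDigits 2 n := by
  intro n
  induction n using Nat.strong_induction_on with
  | _ n ih =>
    intro f hf
    cases f with
    | zero => omega
    | succ f =>
      unfold Nat.toDigits
      simp only [Nat.toDigitsCore]
      by_cases h : n / 2 = 0
      · simp [h]
      · simp only [h, if_false]
        have hn2 : n / 2 < n := Nat.div_lt_self (by omega) (by omega)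
        rw [pv_toDigitsCore_append f (n / 2), pv_toDigitsCore_append n (n / 2),
          ih (n / 2) hn2 f (by omega), ih (n / 2) hn2 n (by omega)]

theorem pv_toDigits_step (m : Nat) (h : 2 ≤ m) :
    Nat.toDigits 2 m = Nat.toDigits 2 (m / 2) ++ [Nat.digitChar (m % 2)] := by
  have h2 : m / 2 ≠ 0 := by omega
  conv_lhs => unfold Nat.toDigits
  simp only [Nat.toDigitsCore, h2, if_false]
  rw [pv_toDigitsCore_append m (m / 2),
    pv_toDigitsCore_fuel (m / 2) m (Nat.div_lt_self (by omega) (by omega))]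

theorem pv_toDigits_mem (m : Nat) : ∀ c ∈ Nat.toDigits 2 m, c = '0' ∨ c = '1' := by
  induction m using Nat.strong_induction_on with
  | _ m ih =>
    by_cases h : 2 ≤ m
    · intro c hc
      rw [pv_toDigits_step m h] at hc
      rcases List.mem_append.mp hc with hc | hc
      · exact ih (m / 2) (Nat.div_lt_self (by omega) (by omega)) c hc
      · simp only [List.mem_singleton] at hc
        subst hc
        have : m % 2 = 0 ∨ m % 2 = 1 := by omega
        rcases this with h' | h' <;> rw [h'] <;> simp [Nat.digitChar]
    · interval_cases m <;> simp [Nat.toDigits, Nat.toDigitsCore, Nat.digitChar]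

-- ---- pvBits basics ----
theorem pv_bits_length : ∀ (L m : Nat), (pvBits L m).length = L := by
  intro L
  induction L with
  | zero => intro m; simp [pvBits]
  | succ L ih => intro m; simp [pvBits, ih]

theorem pv_bits_zero : ∀ (L : Nat), pvBits L 0 = List.replicate L false := by
  intro L
  induction L with
  | zero => simp [pvBits]
  | succ L ih => simp [pvBits, ih, List.replicate_succ']

theorem pv_bits_ones : ∀ (L : Nat), pvBits L (2 ^ L - 1) = List.replicate L true := by
  intro L
  induction L with
  | zero => simp [pvBits]
  | succ L ih =>
    have h2 : 1 ≤ 2 ^ L := Nat.one_le_two_pow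
    have hd : (2 ^ (L + 1) - 1) / 2 = 2 ^ L - 1 := by rw [pow_succ]; omega
    have hm : (2 ^ (L + 1) - 1) % 2 = 1 := by rw [pow_succ]; omega
    simp [pvBits, hd, hm, ih, List.replicate_succ']

theorem pv_bits_low : ∀ (L m : Nat), m < 2 ^ L → pvBits (L + 1) m = false :: pvBits L m := by
  intro L
  induction L with
  | zero =>
    intro m hm
    interval_cases m
    simp [pvBits]
  | succ L ih =>
    intro m hm
    have hm2 : m / 2 < 2 ^ L := by rw [pow_succ] at hm; omega
    show pvBits (L + 1) (m / 2) ++ [decide (m % 2 = 1)] = false :: pvBits (L + 1) m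
    rw [ih (m / 2) hm2]
    simp [pvBits]

theorem pv_bits_high : ∀ (L m : Nat), m < 2 ^ L → pvBits (L + 1) (2 ^ L + m) = true :: pvBits L m := by
  intro L
  induction L with
  | zero =>
    intro m hm
    interval_cases m
    simp [pvBits]
  | succ L ih =>
    intro m hm
    have hm2 : m / 2 < 2 ^ L := by rw [pow_succ] at hm; omega
    have hd : (2 ^ (L + 1) + m) / 2 = 2 ^ L + m / 2 := by rw [pow_succ]; omega
    have hm' : (2 ^ (L + 1) + m) % 2 = m % 2 := by rw [pow_succ]; omega
    show pvBits (L + 1) ((2 ^ (L + 1) + m) / 2) ++ [decide ((2 ^ (L + 1) + m) % 2 = 1)]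
        = true :: pvBits (L + 1) m
    rw [hd, hm', ih (m / 2) hm2]
    simp [pvBits]

theorem pv_bits_count_pos : ∀ (L m : Nat), 1 ≤ m → m < 2 ^ L → 0 < (pvBits L m).count true := by
  intro L
  induction L with
  | zero => intro m h1 h2; omega
  | succ L ih =>
    intro m h1 h2
    by_cases hp : m % 2 = 1
    · simp [pvBits, hp]
    · have h1' : 1 ≤ m / 2 := by omega
      have h2' : m / 2 < 2 ^ L := by rw [pow_succ] at h2; omega
      simp [pvBits, hp]
      have := ih (m / 2) h1' h2'
      simp [List.count_append] at this ⊢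
      omega

-- ---- zfill of a binary-digit string is left zero-padding ----
def pvPad (L : Nat) (cs : List Char) : List Char := List.replicate (L - cs.length) '0' ++ cs

theorem pv_zfill_eq_pad (cs : List Char) (L : Nat)
    (h : ∀ c ∈ cs, c = '0' ∨ c = '1') :
    PySem.Chars.zfill cs (L : Int) = pvPad L cs := by
  unfold PySem.Chars.zfill pvPad
  by_cases hle : (L : Int) ≤ (cs.length : Int)
  · have : L - cs.length = 0 := by omega
    simp [hle, this]
  · have hL : (L : Int).toNat = L := by omega
    simp only [hle, if_false]
    cases cs with
    | nil => simp [hL]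
    | cons c rest =>
      have hc : ¬ (c = '+' ∨ c = '-') := by
        rcases h c (List.mem_cons_self) with h' | h' <;> subst h' <;> decide
      simp [hc, hL]

theorem pv_pad_toDigits : ∀ (L : Nat), 1 ≤ L → ∀ (m : Nat), m < 2 ^ L →
    pvPad L (Nat.toDigits 2 m) = (pvBits L m).map pvCharOf := by
  intro L
  induction L with
  | zero => intro h; omega
  | succ L ih =>
    intro _ m hm
    by_cases h2 : 2 ≤ m
    · have hL1 : 1 ≤ L := by
        by_contra hc
        have : L = 0 := by omega
        subst this
        simp at hm; omega
      have hm2 : m / 2 < 2 ^ L := by rw [pow_succ] at hm; omega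
      have hlen : (Nat.toDigits 2 (m / 2)).length ≤ L :=
        Nat.toDigits_length 2 (m / 2) L (by omega) hm2
      rw [pv_toDigits_step m h2]
      have hpad : pvPad (L + 1) (Nat.toDigits 2 (m / 2) ++ [Nat.digitChar (m % 2)])
          = pvPad L (Nat.toDigits 2 (m / 2)) ++ [Nat.digitChar (m % 2)] := by
        unfold pvPad
        simp only [List.length_append, List.length_singleton]
        rw [show L + 1 - ((Nat.toDigits 2 (m / 2)).length + 1) = L - (Nat.toDigits 2 (m / 2)).length by omega]
        simp
      rw [hpad, ih hL1 (m / 2) hm2]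
      show _ = (pvBits L (m / 2) ++ [decide (m % 2 = 1)]).map pvCharOf
      rw [List.map_append]
      congr 1
      have : m % 2 = 0 ∨ m % 2 = 1 := by omega
      rcases this with h' | h' <;> rw [h'] <;> simp [Nat.digitChar, pvCharOf]
    · have : m = 0 ∨ m = 1 := by omega
      rcases this with h' | h' <;> subst h'
      · show pvPad (L + 1) (Nat.toDigits 2 0) = (pvBits (L + 1) 0).map pvCharOf
        rw [pv_bits_zero]
        show pvPad (L + 1) ['0'] = _
        unfold pvPad
        simp [List.replicate_succ', pvCharOf]
      · show pvPad (L + 1) (Nat.toDigits 2 1) = (pvBits (L + 1) 1).map pvCharOf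
        show pvPad (L + 1) ['1'] = (pvBits L 0 ++ [decide (1 % 2 = 1)]).map pvCharOf
        rw [pv_bits_zero]
        unfold pvPad
        simp [pvCharOf]

theorem pv_bn (L m : Nat) (h1 : 1 ≤ L) (hm : m < 2 ^ L) :
    PySem.Chars.zfill (PySem.Int.toBinChars (m : Int)) (L : Int) = (pvBits L m).map pvCharOf := by
  have hb : PySem.Int.toBinChars (m : Int) = Nat.toDigits 2 m := by
    unfold PySem.Int.toBinChars
    simp
  rw [hb, pv_zfill_eq_pad _ _ (pv_toDigits_mem m), pv_pad_toDigits L h1 m hm]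

theorem pv_count_map : ∀ (bs : List Bool), (bs.map pvCharOf).count '1' = bs.count true := by
  intro bs
  induction bs with
  | nil => simp
  | cons b t ih =>
    cases b <;> simp [List.count_cons, pvCharOf, ih]

-- ---- pvIdxs basics ----
theorem pv_idxs_mem : ∀ (bs : List Bool) (s x : Int), x ∈ pvIdxs bs s → s ≤ x := by
  intro bs
  induction bs with
  | nil => intro s x hx; simp [pvIdxs] at hx
  | cons b t ih =>
    intro s x hx
    simp only [pvIdxs] at hx
    rcases List.mem_append.mp hx with h | h
    · cases b <;> simp at h; omega
    · have := ih (s + 1) x h; omega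

theorem pv_idxs_shift : ∀ (bs : List Bool) (s : Int), pvIdxs bs (s + 1) = (pvIdxs bs s).map (· + 1) := by
  intro bs
  induction bs with
  | nil => intro s; simp [pvIdxs]
  | cons b t ih =>
    intro s
    simp only [pvIdxs, List.map_append, ih (s + 1)]
    congr 1
    cases b <;> simp

theorem pv_idxs_pairwise : ∀ (bs : List Bool) (s : Int), (pvIdxs bs s).Pairwise (· < ·) := by
  intro bs
  induction bs with
  | nil => intro s; simp [pvIdxs]
  | cons b t ih =>
    intro s
    simp only [pvIdxs]
    cases b
    · simpa using ih (s + 1)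
    · simp only [if_true, List.singleton_append, List.pairwise_cons]
      refine ⟨fun x hx => by have := pv_idxs_mem t (s + 1) x hx; omega, ih (s + 1)⟩

-- ---- the enumerate/set-add loop collects the positions of the ones ----
theorem pv_fold_idx : ∀ (bs : List Bool) (s : Int) (acc : List Int), (∀ x ∈ acc, x < s) →
    (PySem.List.enumerate (bs.map pvCharOf) s).foldl
      (fun (indices : PySem.Set Int) ib =>
        if ib.2 = '1' then PySem.Set.add indices ib.1 else indices) acc
    = acc ++ pvIdxs bs s := by
  intro bs
  induction bs with
  | nil => intro s acc _; simp [pvIdxs]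
  | cons b t ih =>
    intro s acc hacc
    rw [List.map_cons, PySem.List.enumerate_cons, List.foldl_cons]
    cases b
    · have hne : ¬ (pvCharOf false = '1') := by decide
      simp only [hne, if_false]
      rw [ih (s + 1) acc (fun x hx => by have := hacc x hx; omega)]
      simp [pvIdxs]
    · have heq : (pvCharOf true = '1') := by decide
      simp only [heq, if_true]
      have hadd : PySem.Set.add acc s = acc ++ [s] :=
        PySem.Set.add_of_not_mem (fun hmem => by have := hacc s hmem; omega)
      rw [hadd, ih (s + 1) (acc ++ [s]) (by intro x hx; rcases List.mem_append.mp hx with h | h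
                                            · have := hacc x h; omega
                                            · simp at h; omega)]
      simp [pvIdxs]

-- ---- filterMap with an if-condition is filter-then-map ----
theorem pv_filterMap_eq (f : Nat → List Int) (p : Nat → Int) (k : Int) : ∀ (l : List Nat),
    l.filterMap (fun m => if p m = k then some (f m) else none)
    = (l.filter (fun m => decide (p m = k))).map f := by
  intro l
  induction l with
  | nil => simp
  | cons h t ih =>
    by_cases hc : p h = k <;> simp [List.filter_cons, hc, ih]

-- ---- pvA: base case, recurrence, and emptiness outside 0..L ----
theorem pv_pvA_zero (k : Int) : pvA 0 k = if k = 0 then [[]] else [] := by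
  unfold pvA
  by_cases hk : k = 0 <;> simp [pvBits, pvIdxs, List.range_succ, hk] <;> omega

theorem pv_pvA_rec (L : Nat) (k : Int) :
    pvA (L + 1) k = (pvA L k).map (fun s => s.map (· + 1))
      ++ (pvA L (k - 1)).map (fun s => 0 :: s.map (· + 1)) := by
  unfold pvA
  have hsplit : 2 ^ (L + 1) = 2 ^ L + 2 ^ L := by rw [pow_succ]; omega
  rw [hsplit, List.range_add, List.filterMap_append, List.filterMap_map]
  congr 1
  · rw [List.map_filterMap]
    apply List.filterMap_congr
    intro m hm
    have hm' : m < 2 ^ L := List.mem_range.mp hm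
    rw [pv_bits_low L m hm']
    have hcnt : (false :: pvBits L m).count true = (pvBits L m).count true := by
      simp [List.count_cons]
    have hidx : pvIdxs (false :: pvBits L m) 0 = (pvIdxs (pvBits L m) 0).map (· + 1) := by
      have h1 : pvIdxs (pvBits L m) (0 + 1) = (pvIdxs (pvBits L m) 0).map (· + 1) :=
        pv_idxs_shift _ 0
      simpa [pvIdxs] using h1
    rw [hcnt, hidx]
    by_cases hc : ((pvBits L m).count true : Int) = k
    · simp [hc]
    · simp [hc]
  · rw [List.map_filterMap]
    apply List.filterMap_congr
    intro m hm
    have hm' : m < 2 ^ L := List.mem_range.mp hm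
    simp only [Function.comp_apply]
    rw [pv_bits_high L m hm']
    have hcnt : (true :: pvBits L m).count true = (pvBits L m).count true + 1 := by
      simp [List.count_cons]
    have hidx : pvIdxs (true :: pvBits L m) 0 = 0 :: (pvIdxs (pvBits L m) 0).map (· + 1) := by
      have h1 : pvIdxs (pvBits L m) (0 + 1) = (pvIdxs (pvBits L m) 0).map (· + 1) :=
        pv_idxs_shift _ 0
      simpa [pvIdxs] using h1
    rw [hcnt, hidx]
    by_cases hc : ((pvBits L m).count true : Int) = k - 1
    · have hc' : (((pvBits L m).count true + 1 : Nat) : Int) = k := by push_cast; omega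
      simp [hc, hc']
    · have hc' : ¬ (((pvBits L m).count true + 1 : Nat) : Int) = k := by push_cast; omega
      simp [hc, hc']
      omega

theorem pv_pvA_nil (L : Nat) (k : Int) (h : k < 0 ∨ (L : Int) < k) : pvA L k = [] := by
  unfold pvA
  rw [List.filterMap_eq_nil_iff]
  intro m hm
  have hcnt : (pvBits L m).count true ≤ L := by
    have := List.count_le_length (l := pvBits L m) (a := true)
    rwa [pv_bits_length] at this
  have : ¬ ((pvBits L m).count true : Int) = k := by
    rcases h with h | h
    · have : (0 : Int) ≤ ((pvBits L m).count true : Int) := by positivity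
      omega
    · have : ((pvBits L m).count true : Int) ≤ (L : Int) := by exact_mod_cast hcnt
      omega
  simp [this]

-- ---- Source B's DP rows, characterised: after l rounds, rows[k] = pvA l k ----
theorem pv_getD_map_range {α : Type} (f : Nat → α) (d : α) (n k : Nat) (hk : k < n) :
    ((List.range n).map f).getD k d = f k := by
  rw [List.getD_eq_getElem?_getD, List.getElem?_map]
  simp [List.getElem?_range, hk]

theorem pv_step_row (n l : Nat) :
    pvAltStep n ((List.range (n + 1)).map (fun (k : Nat) => pvA l (k : Int)))
      = (List.range (n + 1)).map (fun (k : Nat) => pvA (l + 1) (k : Int)) := by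
  unfold pvAltStep
  apply List.map_congr_left
  intro k hk
  have hk' : k < n + 1 := List.mem_range.mp hk
  rw [pv_getD_map_range _ _ _ _ hk', pv_pvA_rec l (k : Int)]
  congr 1
  by_cases h0 : k > 0
  · rw [if_pos h0, pv_getD_map_range _ _ _ _ (by omega),
      show ((k - 1 : Nat) : Int) = (k : Int) - 1 from by omega]
  · have : k = 0 := by omega
    subst this
    rw [if_neg h0, show ((0 : Nat) : Int) - 1 = (-1 : Int) from by norm_num,
      pv_pvA_nil l (-1) (by omega)]
    simp

theorem pv_row0 (n : Nat) :
    (List.range (n + 1)).map (fun (k : Nat) => pvA 0 (k : Int)) = [[[]]] ++ List.replicate n [] := by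
  rw [List.range_succ_eq_map, List.map_cons, List.map_map]
  show pvA 0 ((0 : Nat) : Int) :: _ = [[]] :: List.replicate n []
  congr 1
  rw [List.eq_replicate_iff]
  refine ⟨by simp, ?_⟩
  intro b hb
  rcases List.mem_map.mp hb with ⟨k, _, rfl⟩
  simp only [Function.comp_apply]
  rw [pv_pvA_zero]
  have hne : ¬ ((k.succ : Nat) : Int) = 0 := by omega
  simp [hne]
  omega

theorem pv_row_inv (n : Nat) : ∀ (xs : List Int) (l : Nat),
    xs.foldl (fun rows _ => pvAltStep n rows) ((List.range (n + 1)).map (fun (k : Nat) => pvA l (k : Int)))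
      = (List.range (n + 1)).map (fun (k : Nat) => pvA (l + xs.length) (k : Int)) := by
  intro xs
  induction xs with
  | nil => intro l; simp
  | cons x t ih =>
    intro l
    rw [List.foldl_cons, pv_step_row n l, ih (l + 1)]
    simp only [List.length_cons]
    rw [show l + (t.length + 1) = l + 1 + t.length from by omega]

theorem pv_alt_value (L : Nat) (n : Int) (h : 0 < n) :
    (((PySem.List.pyRange 0 (L : Int)).foldl (fun rows _ => pvAltStep n.toNat rows)
        ([[[]]] ++ List.replicate n.toNat [])).getD n.toNat []) = pvA L n := by
  obtain ⟨N, rfl⟩ : ∃ N : Nat, n = (N : Int) := ⟨n.toNat, by omega⟩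
  simp only [Int.toNat_natCast]
  rw [← pv_row0 N, pv_row_inv N _ 0]
  have hlen : (PySem.List.pyRange 0 (L : Int)).length = L := by
    rw [PySem.List.pyRange_one]
    simp
  rw [hlen, pv_getD_map_range _ _ _ _ (by omega), Nat.zero_add]

-- ---- elements of pvA are strictly increasing lists, so set(s) leaves them unchanged ----
theorem pv_ofList_pvA (L : Nat) (k : Int) : (pvA L k).map PySem.Set.ofList = pvA L k := by
  have h : ∀ s ∈ pvA L k, PySem.Set.ofList s = s := by
    intro s hs
    unfold pvA at hs
    rcases List.mem_filterMap.mp hs with ⟨m, _, hm⟩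
    by_cases hc : ((pvBits L m).count true : Int) = k
    · rw [if_pos hc] at hm
      have hs' : s = pvIdxs (pvBits L m) 0 := by cases hm; rfl
      subst hs'
      exact PySem.Set.ofList_eq_self_of_nodup _ (pv_idxs_pairwise _ _).nodup
    · rw [if_neg hc] at hm; cases hm
  calc (pvA L k).map PySem.Set.ofList = (pvA L k).map id := List.map_congr_left h
    _ = pvA L k := List.map_id _

-- ---- a skip-or-append loop is filter-then-map ----
theorem pv_foldl_skip {α β : Type} (p : α → Prop) [DecidablePred p] (f : α → β) :
    ∀ (l : List α) (acc : List β),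
      l.foldl (fun r x => if ¬ p x then r else r ++ [f x]) acc
        = acc ++ (l.filter (fun x => decide (p x))).map f := by
  intro l
  induction l with
  | nil => intro acc; simp
  | cons h t ih =>
    intro acc
    rw [List.foldl_cons]
    by_cases hc : p h
    · rw [if_neg (not_not_intro hc), ih (acc ++ [f h]),
        List.filter_cons_of_pos (by simpa using hc)]
      simp
    · rw [if_pos hc, ih acc, List.filter_cons_of_neg (by simpa using hc)]

-- ---- congruence for map-filter-map pipelines over the same index list ----
theorem pv_map_filter_congr {α β γ δ : Type} (g : α → β) (g' : α → γ)
    (q : β → Bool) (q' : γ → Bool) (f : β → δ) (f' : γ → δ) :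
    ∀ (l : List α), (∀ x ∈ l, q (g x) = q' (g' x)) → (∀ x ∈ l, f (g x) = f' (g' x)) →
      ((l.map g).filter q).map f = ((l.map g').filter q').map f' := by
  intro l
  induction l with
  | nil => intro _ _; simp
  | cons h t ih =>
    intro hq hf
    have hq' := hq h List.mem_cons_self
    have hf' := hf h List.mem_cons_self
    rw [List.map_cons, List.map_cons, List.filter_cons, List.filter_cons, ← hq']
    by_cases hc : q (g h)
    · simp only [hc, if_true, List.map_cons, hf']
      rw [ih (fun x hx => hq x (List.mem_cons_of_mem h hx))
          (fun x hx => hf x (List.mem_cons_of_mem h hx))]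
    · simp only [hc, Bool.false_eq_true, if_false]
      exact ih (fun x hx => hq x (List.mem_cons_of_mem h hx))
        (fun x hx => hf x (List.mem_cons_of_mem h hx))

-- ---- A's loop over range(1, 2**L - 1), characterised ----
theorem pv_A_eq_filter (L : Nat) (n : Int) :
    ((PySem.List.pyRange 1 ((2 : Int) ^ L - 1)).foldl
      (fun r x => if ¬ ((PySem.Chars.count (PySem.Chars.zfill (PySem.Int.toBinChars x) (L : Int)) ['1'] : Int) = n)
        then r
        else r ++ [(PySem.List.enumerate (PySem.Chars.zfill (PySem.Int.toBinChars x) (L : Int))).foldl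
            (fun (indices : PySem.Set Int) ib =>
              if ib.2 = '1' then PySem.Set.add indices ib.1 else indices)
            PySem.Set.empty]) [])
    = (((List.range (2 ^ L - 2)).map (fun k => 1 + k)).filter
        (fun m => decide (((pvBits L m).count true : Int) = n))).map
        (fun m => pvIdxs (pvBits L m) 0) := by
  rw [pv_foldl_skip, List.nil_append, PySem.List.pyRange_one]
  have hp : (2 : Int) ^ L = ((2 ^ L : Nat) : Int) := by push_cast; ring
  have ht : ((2 : Int) ^ L - 1 - 1).toNat = 2 ^ L - 2 := by rw [hp]; omega
  rw [ht]
  have hbn : ∀ k ∈ List.range (2 ^ L - 2),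
      PySem.Chars.zfill (PySem.Int.toBinChars ((1 : Int) + (k : Int))) (L : Int)
        = (pvBits L (1 + k)).map pvCharOf := by
    intro k hk
    have hk' : k < 2 ^ L - 2 := List.mem_range.mp hk
    have hL : 1 ≤ L := by
      by_contra hc
      have : L = 0 := by omega
      subst this
      simp at hk'
    have hc : (1 : Int) + (k : Int) = ((1 + k : Nat) : Int) := by push_cast; ring
    rw [hc, pv_bn L (1 + k) hL (by omega)]
  apply pv_map_filter_congr
  · intro k hk
    rw [hbn k hk, pv_count_single, pv_count_map]
  · intro k hk
    rw [hbn k hk,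
      pv_fold_idx (pvBits L (1 + k)) 0 PySem.Set.empty
        (by intro x hx; simp [PySem.Set.empty] at hx)]
    simp [PySem.Set.empty]

-- ---- pvA with 0 < n < L is A's filtered range ----
theorem pv_pvA_eq_filter (L : Nat) (n : Int) (h1 : 0 < n) (h2 : n < (L : Int)) :
    pvA L n = (((List.range (2 ^ L - 2)).map (fun k => 1 + k)).filter
        (fun m => decide (((pvBits L m).count true : Int) = n))).map
        (fun m => pvIdxs (pvBits L m) 0) := by
  have hL2 : 2 ≤ L := by omega
  have h4 : 4 ≤ 2 ^ L := by
    calc (4 : Nat) = 2 ^ 2 := rfl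
    _ ≤ 2 ^ L := Nat.pow_le_pow_right (by norm_num) hL2
  obtain ⟨X, hX⟩ : ∃ X, X = 2 ^ L - 2 := ⟨_, rfl⟩
  rw [← hX]
  have hsplit : List.range (2 ^ L)
      = [0] ++ ((List.range X).map (fun k => 1 + k) ++ [1 + X]) := by
    rw [show 2 ^ L = 1 + (X + 1) from by omega, List.range_add,
      show List.range 1 = [0] from rfl, List.range_succ, List.map_append]
    simp
  unfold pvA
  rw [hsplit, List.filterMap_append, List.filterMap_append]
  have hz : ¬ ((pvBits L 0).count true : Int) = n := by
    rw [pv_bits_zero]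
    simp [List.count_replicate]
    omega
  have htop : ¬ ((pvBits L (1 + X)).count true : Int) = n := by
    rw [show 1 + X = 2 ^ L - 1 from by omega, pv_bits_ones]
    simp
    omega
  rw [show ([0] : List Nat).filterMap (fun m =>
      if ((pvBits L m).count true : Int) = n then some (pvIdxs (pvBits L m) 0) else none) = []
    from by simp [hz]]
  rw [show ([1 + X] : List Nat).filterMap (fun m =>
      if ((pvBits L m).count true : Int) = n then some (pvIdxs (pvBits L m) 0) else none) = []
    from by simp [htop]]
  rw [List.nil_append, List.append_nil]
  exact pv_filterMap_eq (fun m => pvIdxs (pvBits L m) 0)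
    (fun m => ((pvBits L m).count true : Int)) n _


-- ===== VERDICT (by name: the statement is the Claim_ definition above) =====
theorem select_digits_indices_spec : Claim_equal_select_digits_indices := by
  intro nl n _ hPre
  unfold Spec_select_digits_indices select_digits_indices select_digits_indices_alt
  by_cases hge : n ≥ nl
  · rw [if_pos hge, if_pos hge]
  · have hnl : 0 ≤ nl := by
      unfold Pre_select_digits_indices at hPre
      omega
    obtain ⟨L, rfl⟩ : ∃ L : Nat, nl = (L : Int) := ⟨nl.toNat, by omega⟩
    rw [if_neg hge, if_neg hge]
    simp only [Int.toNat_natCast]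
    have hlt : n < (L : Int) := by omega
    have hA := pv_A_eq_filter L n
    by_cases hn0 : n ≤ 0
    · rw [if_pos hn0]
      have hnilf : (((List.range (2 ^ L - 2)).map (fun k => 1 + k)).filter
          (fun m => decide (((pvBits L m).count true : Int) = n))) = [] := by
        rw [List.filter_eq_nil_iff]
        intro m hm
        rcases List.mem_map.mp hm with ⟨k, hk, rfl⟩
        have hk' : k < 2 ^ L - 2 := List.mem_range.mp hk
        have hL1 : 1 ≤ L := by
          by_contra hc
          have : L = 0 := by omega
          subst this
          simp at hk'
        have hpos := pv_bits_count_pos L (1 + k) (by omega) (by omega)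
        simp only [decide_eq_true_eq]
        intro hcon
        omega
      refine Eq.trans (congrArg some hA) ?_
      rw [hnilf]
      rfl
    · rw [if_neg hn0]
      have hB : (((PySem.List.pyRange 0 (L : Int)).foldl (fun rows _ => pvAltStep n.toNat rows)
          ([[[]]] ++ List.replicate n.toNat [])).getD n.toNat []).map PySem.Set.ofList
          = (((List.range (2 ^ L - 2)).map (fun k => 1 + k)).filter
              (fun m => decide (((pvBits L m).count true : Int) = n))).map
              (fun m => pvIdxs (pvBits L m) 0) := by
        rw [pv_alt_value L n (by omega), pv_ofList_pvA, pv_pvA_eq_filter L n (by omega) hlt]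
      exact (congrArg some hA).trans (congrArg some hB.symm)
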